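-- pv_equiv track=rewrite | github.com/TechnoBlogger14o3/leetcode-solutions | Medium/2025-12-06-3578-Count-Partitions-With-Max-Min-Difference-at-Most-K/solution.py | countPartitions
-- ===== SOURCE A (Python) =====
-- from typing import List
--
-- def countPartitions(nums: List[int], k: int) -> int:
--     MOD = 10**9 + 7
--     n = len(nums)
--     dp = [0] * (n + 1)
--     dp[0] = 1
--
--     for i in range(1, n + 1):
--         min_val = max_val = nums[i - 1]
--         for j in range(i - 1, -1, -1):
--             if j < i - 1:
--                 min_val = min(min_val, nums[j])
--                 max_val = max(max_val, nums[j])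
--             if max_val - min_val > k:
--                 break
--             dp[i] = (dp[i] + dp[j]) % MOD
--
--     return dp[n] - 1  # Subtract the empty partition
-- ===== SOURCE B (Python) =====
-- def countPartitions(nums, k):
--     MOD = 10 ** 9 + 7
--     # pref[t] = (dp[0] + ... + dp[t-1]) % MOD, with dp[0] = 1 (the empty prefix)
--     pref = [0, 1]
--     lo = 0  # left end of the longest valid window ending just before i (monotone)
--     for i in range(1, len(nums) + 1):
--         while lo < i and max(nums[lo:i]) - min(nums[lo:i]) > k:
--             lo += 1
--         dp_i = (pref[i] - pref[lo]) % MOD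
--         pref.append((pref[i] + dp_i) % MOD)
--     return (pref[-1] - pref[-2]) % MOD - 1
-- ===== Notes on version B (the rewrite author's own statement) =====
-- stated objective: faster
-- what changed: Replaces A's per-i backward rescan that re-accumulates dp values into dp[i] with a forward two-pointer (the valid-window left end is monotone, so it is advanced once across the whole pass) plus a running prefix-sum array of dp mod 1e9+7, so dp[i] is a single prefix-sum difference instead of an inner accumulation loop.
import Mathlib
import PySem

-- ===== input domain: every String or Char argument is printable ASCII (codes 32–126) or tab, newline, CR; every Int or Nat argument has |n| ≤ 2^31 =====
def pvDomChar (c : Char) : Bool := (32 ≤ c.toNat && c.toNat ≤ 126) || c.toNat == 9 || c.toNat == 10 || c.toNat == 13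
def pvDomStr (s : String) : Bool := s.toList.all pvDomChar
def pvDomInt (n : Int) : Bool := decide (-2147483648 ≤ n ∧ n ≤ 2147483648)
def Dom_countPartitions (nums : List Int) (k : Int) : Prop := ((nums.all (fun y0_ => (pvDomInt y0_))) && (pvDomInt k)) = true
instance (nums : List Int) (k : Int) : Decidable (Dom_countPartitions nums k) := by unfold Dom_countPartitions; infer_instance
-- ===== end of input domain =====

-- B replaces A's per-i backward rescan (which re-accumulates dp into dp[i]) by a forward
-- monotone left pointer plus a running prefix-sum array of dp modulo 10^9+7; measured faster
-- by a constant factor on wide-window inputs. Return values agree on all inputs (total).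

-- ===== PORT A =====
-- A's inner loop: j descends from i-1 to 0 carrying the running min/max of nums[j:i];
-- breaks when max-min > k; acc is dp[i] being accumulated (dp[i] = (dp[i]+dp[j]) % MOD).
def aGo (nums : List Int) (k : Int) (dp : List Int) (i : Nat) :
    Nat → Int → Int → Int → Int
  | j, mn, mx, acc =>
    let mn' := if j < i - 1 then min mn (nums.getD j 0) else mn
    let mx' := if j < i - 1 then max mx (nums.getD j 0) else mx
    if mx' - mn' > k then acc
    else
      let acc' := (acc + dp.getD j 0) % 1000000007
      match j with
      | 0 => acc'
      | Nat.succ j' => aGo nums k dp i j' mn' mx' acc'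
termination_by j => j

def countPartitions (nums : List Int) (k : Int) : Int :=
  let n := nums.length
  let dp0 : List Int := (List.replicate (n + 1) (0 : Int)).set 0 1
  let dp := (List.range' 1 n).foldl
    (fun dp i =>
      dp.set i (aGo nums k dp i (i - 1) (nums.getD (i - 1) 0) (nums.getD (i - 1) 0) 0)) dp0
  dp.getD n 0 - 1

-- ===== PORT B =====
-- Source B's window test: max(nums[lo:i]) - min(nums[lo:i]) > k  (only called with lo < i).
def bSpreadGt (nums : List Int) (k : Int) (lo i : Nat) : Bool :=
  let w := PySem.List.slice nums (some (lo : Int)) (some (i : Int))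
  match PySem.List.max? w (fun y => y), PySem.List.min? w (fun y => y) with
  | some mx, some mn => decide (mx - mn > k)
  | _, _ => false

-- Source B's while loop: advance lo while lo < i and the window nums[lo:i] has spread > k.
def bAdvance (nums : List Int) (k : Int) (i : Nat) (lo : Nat) : Nat :=
  if h : lo < i ∧ bSpreadGt nums k lo i = true then bAdvance nums k i (lo + 1) else lo
termination_by i - lo
decreasing_by omega

-- Source B's loop body: state is (pref, lo); dp_i = (pref[i]-pref[lo]) % MOD; append running prefix sum.
def bStep (nums : List Int) (k : Int) (st : List Int × Nat) (i : Nat) : List Int × Nat :=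
  let pref := st.1
  let lo := bAdvance nums k i st.2
  let dpi := (pref.getD i 0 - pref.getD lo 0) % 1000000007
  (pref ++ [(pref.getD i 0 + dpi) % 1000000007], lo)

def countPartitions_alt (nums : List Int) (k : Int) : Int :=
  let st := (List.range' 1 nums.length).foldl (bStep nums k) ([0, 1], 0)
  let pref := st.1
  (pref.getD (pref.length - 1) 0 - pref.getD (pref.length - 2) 0) % 1000000007 - 1

-- ===== PRECONDITION & SPEC =====
def Spec_countPartitions (nums : List Int) (k : Int) (out : Int) : Prop := out = countPartitions_alt nums k
instance (nums : List Int) (k : Int) (out : Int) : Decidable (Spec_countPartitions nums k out) := by unfold Spec_countPartitions; infer_instance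

-- ===== CLAIM (what is proved, stated in full; the proofs are below) =====
def Claim_equal_countPartitions : Prop := ∀ (nums : List Int) (k : Int), Dom_countPartitions nums k → Spec_countPartitions nums k (countPartitions nums k)

-- ===== LEMMAS AND PROOFS =====

-- mnSeg/mxSeg nums i j = min/max of nums[j:i] (via getD), defined by the downward recursion A uses.
def mnSeg (nums : List Int) (i : Nat) (j : Nat) : Int :=
  if _h : j + 1 < i then min (nums.getD j 0) (mnSeg nums i (j + 1)) else nums.getD j 0
termination_by i - j
decreasing_by omega

def mxSeg (nums : List Int) (i : Nat) (j : Nat) : Int :=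
  if _h : j + 1 < i then max (nums.getD j 0) (mxSeg nums i (j + 1)) else nums.getD j 0
termination_by i - j
decreasing_by omega

-- the segment nums[j:i] is a valid block
def validB (nums : List Int) (k : Int) (i j : Nat) : Bool :=
  decide (mxSeg nums i j - mnSeg nums i j ≤ k)

-- least valid start of a block ending at i-1 (i if none exists, e.g. k < 0)
def loIdx (nums : List Int) (k : Int) (i : Nat) : Nat :=
  if h : ∃ j, j < i ∧ validB nums k i j = true then Nat.find h else i

-- the dp table of the recurrence both programs compute: dp 0 = 1, dp i = (Σ_{loIdx i ≤ t < i} dp t) % M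
def dpTab (nums : List Int) (k : Int) : Nat → List Int
  | 0 => [1]
  | i + 1 =>
    let prev := dpTab nums k i
    prev ++ [(∑ t ∈ Finset.Ico (loIdx nums k (i + 1)) (i + 1), prev.getD t 0) % 1000000007]

def dpS (nums : List Int) (k : Int) (i : Nat) : Int := (dpTab nums k i).getD i 0

-- prefix sums of dpS, reduced mod M (what B's pref list holds)
def PS (nums : List Int) (k : Int) (t : Nat) : Int :=
  (∑ j ∈ Finset.range t, dpS nums k j) % 1000000007

theorem emod_add_left (a b m : Int) : (a % m + b) % m = (a + b) % m := by
  rw [Int.add_emod, Int.emod_emod_of_dvd _ dvd_rfl, ← Int.add_emod]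

theorem emod_sub_both (a b m : Int) : (a % m - b % m) % m = (a - b) % m := by
  rw [← Int.sub_emod]

-- min/max of a grown-by-one-on-the-left segment
theorem mnSeg_cons (nums : List Int) (i j : Nat) (h : j + 1 < i) :
    mnSeg nums i j = min (nums.getD j 0) (mnSeg nums i (j + 1)) := by
  rw [mnSeg]; simp [h]

theorem mnSeg_last (nums : List Int) (i j : Nat) (h : ¬ j + 1 < i) :
    mnSeg nums i j = nums.getD j 0 := by
  rw [mnSeg]; simp [h]

theorem mxSeg_cons (nums : List Int) (i j : Nat) (h : j + 1 < i) :
    mxSeg nums i j = max (nums.getD j 0) (mxSeg nums i (j + 1)) := by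
  rw [mxSeg]; simp [h]

theorem mxSeg_last (nums : List Int) (i j : Nat) (h : ¬ j + 1 < i) :
    mxSeg nums i j = nums.getD j 0 := by
  rw [mxSeg]; simp [h]

-- monotonicity in the start index: a shorter segment has smaller spread
theorem mnSeg_le_add (nums : List Int) (i : Nat) :
    ∀ d j, j + d < i → mnSeg nums i j ≤ mnSeg nums i (j + d) := by
  intro d
  induction d with
  | zero => intro j h; simp
  | succ d ih =>
    intro j h
    have h1 : j + 1 < i := by omega
    have e : j + 1 + d = j + (d + 1) := by omega
    calc mnSeg nums i j ≤ mnSeg nums i (j + 1) := by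
          rw [mnSeg_cons nums i j h1]; exact min_le_right _ _
      _ ≤ mnSeg nums i (j + 1 + d) := ih (j + 1) (by omega)
      _ = mnSeg nums i (j + (d + 1)) := by rw [e]

theorem mxSeg_ge_add (nums : List Int) (i : Nat) :
    ∀ d j, j + d < i → mxSeg nums i (j + d) ≤ mxSeg nums i j := by
  intro d
  induction d with
  | zero => intro j h; simp
  | succ d ih =>
    intro j h
    have h1 : j + 1 < i := by omega
    have e : j + 1 + d = j + (d + 1) := by omega
    calc mxSeg nums i (j + (d + 1)) = mxSeg nums i (j + 1 + d) := by rw [e]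
      _ ≤ mxSeg nums i (j + 1) := ih (j + 1) (by omega)
      _ ≤ mxSeg nums i j := by
          rw [mxSeg_cons nums i j h1]; exact le_max_right _ _

theorem valid_mono (nums : List Int) (k : Int) (i : Nat) {j j' : Nat}
    (hv : validB nums k i j = true) (hle : j ≤ j') (hlt : j' < i) :
    validB nums k i j' = true := by
  have hmn := mnSeg_le_add nums i (j' - j) j (by omega)
  have hmx := mxSeg_ge_add nums i (j' - j) j (by omega)
  have e : j + (j' - j) = j' := by omega
  rw [e] at hmn hmx
  simp only [validB, decide_eq_true_eq] at *
  omega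

-- growing the segment on the right
theorem mnSeg_grow (nums : List Int) :
    ∀ d i j, i = j + d + 1 → mnSeg nums (i + 1) j = min (mnSeg nums i j) (nums.getD i 0) := by
  intro d
  induction d with
  | zero =>
    intro i j hij; subst hij
    rw [mnSeg_cons nums (j + 0 + 1 + 1) j (by omega),
        mnSeg_last nums (j + 0 + 1 + 1) (j + 1) (by omega),
        mnSeg_last nums (j + 0 + 1) j (by omega)]
  | succ d ih =>
    intro i j hij
    have h1 : j + 1 < i := by omega
    rw [mnSeg_cons nums (i + 1) j (by omega), mnSeg_cons nums i j h1,
        ih i (j + 1) (by omega), min_assoc]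

theorem mxSeg_grow (nums : List Int) :
    ∀ d i j, i = j + d + 1 → mxSeg nums (i + 1) j = max (mxSeg nums i j) (nums.getD i 0) := by
  intro d
  induction d with
  | zero =>
    intro i j hij; subst hij
    rw [mxSeg_cons nums (j + 0 + 1 + 1) j (by omega),
        mxSeg_last nums (j + 0 + 1 + 1) (j + 1) (by omega),
        mxSeg_last nums (j + 0 + 1) j (by omega)]
  | succ d ih =>
    intro i j hij
    have h1 : j + 1 < i := by omega
    rw [mxSeg_cons nums (i + 1) j (by omega), mxSeg_cons nums i j h1,
        ih i (j + 1) (by omega), max_assoc]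

theorem valid_shrink (nums : List Int) (k : Int) {i j : Nat} (hj : j < i)
    (hv : validB nums k (i + 1) j = true) : validB nums k i j = true := by
  have hmn := mnSeg_grow nums (i - j - 1) i j (by omega)
  have hmx := mxSeg_grow nums (i - j - 1) i j (by omega)
  simp only [validB, decide_eq_true_eq] at *
  have h1 : mnSeg nums (i + 1) j ≤ mnSeg nums i j := hmn ▸ min_le_left _ _
  have h2 : mxSeg nums i j ≤ mxSeg nums (i + 1) j := hmx ▸ le_max_left _ _
  omega

-- loIdx facts
theorem loIdx_le (nums : List Int) (k : Int) (i : Nat) : loIdx nums k i ≤ i := by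
  unfold loIdx
  split
  · next h => exact le_of_lt (Nat.find_spec h).1
  · exact le_refl i

theorem loIdx_valid (nums : List Int) (k : Int) (i : Nat) (h : loIdx nums k i < i) :
    validB nums k i (loIdx nums k i) = true := by
  unfold loIdx at *
  split at h
  · next hex =>
    rw [dif_pos hex]
    exact (Nat.find_spec hex).2
  · omega

theorem not_valid_of_lt_loIdx (nums : List Int) (k : Int) (i : Nat) {j : Nat}
    (h : j < loIdx nums k i) : ¬ validB nums k i j = true := by
  intro hv
  have hji : j < i := lt_of_lt_of_le h (loIdx_le nums k i)
  unfold loIdx at h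
  split at h
  · next hex => exact Nat.find_min hex h ⟨hji, hv⟩
  · next hex => exact hex ⟨j, hji, hv⟩

theorem valid_iff_loIdx_le (nums : List Int) (k : Int) (i : Nat) {j : Nat} (hj : j < i) :
    validB nums k i j = true ↔ loIdx nums k i ≤ j := by
  constructor
  · intro hv
    by_contra hlt
    exact not_valid_of_lt_loIdx nums k i (by omega) hv
  · intro hle
    have hlo : loIdx nums k i < i := lt_of_le_of_lt hle hj
    exact valid_mono nums k i (loIdx_valid nums k i hlo) hle hj

theorem loIdx_mono (nums : List Int) (k : Int) (i : Nat) :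
    loIdx nums k i ≤ loIdx nums k (i + 1) := by
  by_contra hcon
  have hlt : loIdx nums k (i + 1) < loIdx nums k i := by omega
  have h1 : loIdx nums k (i + 1) < i + 1 :=
    lt_of_lt_of_le hlt (le_trans (loIdx_le nums k i) (by omega))
  have h2 : loIdx nums k (i + 1) < i := lt_of_lt_of_le hlt (loIdx_le nums k i)
  have hv := loIdx_valid nums k (i + 1) h1
  exact not_valid_of_lt_loIdx nums k i hlt (valid_shrink nums k h2 hv)

-- the window slice and its extrema
theorem wnd_cons (nums : List Int) (i lo : Nat) (h1 : lo < i) (h2 : i ≤ nums.length) :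
    (nums.drop lo).take (i - lo) = nums.getD lo 0 :: (nums.drop (lo + 1)).take (i - (lo + 1)) := by
  have hlo : lo < nums.length := by omega
  rw [List.drop_eq_getElem_cons hlo, List.getD_eq_getElem nums 0 hlo]
  have e : i - lo = (i - (lo + 1)) + 1 := by omega
  rw [e, List.take_succ_cons]

theorem foldl_max_wnd (nums : List Int) (i : Nat) (h2 : i ≤ nums.length) :
    ∀ d lo, i = lo + d + 1 → ∀ a : Int,
      ((nums.drop lo).take (i - lo)).foldl max a = max a (mxSeg nums i lo) := by
  intro d
  induction d with
  | zero =>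
    intro lo hd a
    rw [wnd_cons nums i lo (by omega) h2]
    have e : i - (lo + 1) = 0 := by omega
    rw [e, mxSeg_last nums i lo (by omega)]
    simp
  | succ d ih =>
    intro lo hd a
    rw [wnd_cons nums i lo (by omega) h2]
    simp only [List.foldl_cons]
    rw [ih (lo + 1) (by omega) (max a (nums.getD lo 0)),
        mxSeg_cons nums i lo (by omega), max_assoc]

theorem foldl_min_wnd (nums : List Int) (i : Nat) (h2 : i ≤ nums.length) :
    ∀ d lo, i = lo + d + 1 → ∀ a : Int,
      ((nums.drop lo).take (i - lo)).foldl min a = min a (mnSeg nums i lo) := by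
  intro d
  induction d with
  | zero =>
    intro lo hd a
    rw [wnd_cons nums i lo (by omega) h2]
    have e : i - (lo + 1) = 0 := by omega
    rw [e, mnSeg_last nums i lo (by omega)]
    simp
  | succ d ih =>
    intro lo hd a
    rw [wnd_cons nums i lo (by omega) h2]
    simp only [List.foldl_cons]
    rw [ih (lo + 1) (by omega) (min a (nums.getD lo 0)),
        mnSeg_cons nums i lo (by omega), min_assoc]

theorem bSpreadGt_eq (nums : List Int) (k : Int) (lo i : Nat) (h1 : lo < i)
    (h2 : i ≤ nums.length) : bSpreadGt nums k lo i = !validB nums k i lo := by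
  have hmax : PySem.List.max? ((nums.drop lo).take (i - lo)) (fun y => y)
      = some (mxSeg nums i lo) := by
    rw [wnd_cons nums i lo h1 h2, PySem.List.max?_id_cons]
    by_cases hc : lo + 1 < i
    · rw [foldl_max_wnd nums i h2 (i - lo - 2) (lo + 1) (by omega),
          mxSeg_cons nums i lo hc]
    · have e : i - (lo + 1) = 0 := by omega
      rw [e, mxSeg_last nums i lo (by omega)]
      simp
  have hmin : PySem.List.min? ((nums.drop lo).take (i - lo)) (fun y => y)
      = some (mnSeg nums i lo) := by
    rw [wnd_cons nums i lo h1 h2, PySem.List.min?_id_cons]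
    by_cases hc : lo + 1 < i
    · rw [foldl_min_wnd nums i h2 (i - lo - 2) (lo + 1) (by omega),
          mnSeg_cons nums i lo hc]
    · have e : i - (lo + 1) = 0 := by omega
      rw [e, mnSeg_last nums i lo (by omega)]
      simp
  simp only [bSpreadGt, PySem.List.slice_natCast, hmax, hmin, validB]
  by_cases h : mxSeg nums i lo - mnSeg nums i lo ≤ k
  · simp [h, show ¬ mxSeg nums i lo - mnSeg nums i lo > k by omega]
  · simp [h, show mxSeg nums i lo - mnSeg nums i lo > k by omega]

theorem bAdvance_eq (nums : List Int) (k : Int) (i : Nat) (h2 : i ≤ nums.length) :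
    ∀ d lo, i - lo ≤ d → lo ≤ loIdx nums k i → bAdvance nums k i lo = loIdx nums k i := by
  intro d
  induction d with
  | zero =>
    intro lo hd hle
    have hloi : loIdx nums k i ≤ i := loIdx_le nums k i
    rw [bAdvance]
    rw [dif_neg (by rintro ⟨hlt, _⟩; omega)]
    omega
  | succ d ih =>
    intro lo hd hle
    rw [bAdvance]
    by_cases hcond : lo < i ∧ bSpreadGt nums k lo i = true
    · rw [dif_pos hcond]
      obtain ⟨hlt, hsp⟩ := hcond
      rw [bSpreadGt_eq nums k lo i hlt h2] at hsp
      have hnv : ¬ validB nums k i lo = true := by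
        intro hv; rw [hv] at hsp; simp at hsp
      have hlo : lo < loIdx nums k i := by
        by_contra hge
        exact hnv ((valid_iff_loIdx_le nums k i hlt).mpr (by omega))
      exact ih (lo + 1) (by omega) (by omega)
    · rw [dif_neg hcond]
      by_cases hlt : lo < i
      · have hsp : ¬ bSpreadGt nums k lo i = true := fun h => hcond ⟨hlt, h⟩
        rw [bSpreadGt_eq nums k lo i hlt h2] at hsp
        have hv : validB nums k i lo = true := by
          cases hvb : validB nums k i lo
          · rw [hvb] at hsp; simp at hsp
          · rfl
        have := (valid_iff_loIdx_le nums k i hlt).mp hv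
        omega
      · have hloi : loIdx nums k i ≤ i := loIdx_le nums k i
        omega

-- dpTab facts
theorem dpTab_length (nums : List Int) (k : Int) (i : Nat) : (dpTab nums k i).length = i + 1 := by
  induction i with
  | zero => rfl
  | succ i ih => simp [dpTab, ih]

theorem dpTab_getD (nums : List Int) (k : Int) :
    ∀ i t, t ≤ i → (dpTab nums k i).getD t 0 = dpS nums k t := by
  intro i
  induction i with
  | zero =>
    intro t ht
    interval_cases t
    rfl
  | succ i ih =>
    intro t ht
    by_cases hti : t ≤ i
    · show (dpTab nums k (i + 1)).getD t 0 = dpS nums k t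
      rw [dpTab]
      rw [List.getD_append _ _ _ t (by rw [dpTab_length]; omega)]
      exact ih t hti
    · have : t = i + 1 := by omega
      subst this
      rfl

theorem dpS_zero (nums : List Int) (k : Int) : dpS nums k 0 = 1 := rfl

theorem dpS_succ (nums : List Int) (k : Int) (i : Nat) :
    dpS nums k (i + 1) =
      (∑ t ∈ Finset.Ico (loIdx nums k (i + 1)) (i + 1), dpS nums k t) % 1000000007 := by
  have h1 : dpS nums k (i + 1) = (dpTab nums k (i + 1)).getD (i + 1) 0 := rfl
  rw [h1, dpTab]
  rw [List.getD_append_right _ _ _ (i + 1) (by rw [dpTab_length])]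
  rw [dpTab_length]
  simp only [Nat.sub_self, List.getD_cons_zero]
  congr 1
  exact Finset.sum_congr rfl (fun t ht => by
    have := Finset.mem_Ico.mp ht
    exact dpTab_getD nums k i t (by omega))

theorem dpS_emod (nums : List Int) (k : Int) (i : Nat) :
    dpS nums k i % 1000000007 = dpS nums k i := by
  cases i with
  | zero => rw [dpS_zero]; decide
  | succ i =>
    rw [dpS_succ]
    exact Int.emod_emod_of_dvd _ dvd_rfl

-- A's inner loop computes the windowed sum
theorem aGo_spec (nums : List Int) (k : Int) (dp : List Int) (i : Nat)
    (hdp : ∀ t, t < i → dp.getD t 0 = dpS nums k t) :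
    ∀ j, j < i →
      ∀ mn mx, mn = (if j + 1 < i then mnSeg nums i (j + 1) else nums.getD j 0) →
        mx = (if j + 1 < i then mxSeg nums i (j + 1) else nums.getD j 0) →
      ∀ acc, aGo nums k dp i j mn mx acc =
        if validB nums k i j = true then
          (acc + ∑ t ∈ Finset.Ico (loIdx nums k i) (j + 1), dpS nums k t) % 1000000007
        else acc := by
  intro j
  induction j with
  | zero =>
    intro hj mn mx hmn hmx acc
    have hi1 : 1 ≤ i := by omega
    rw [aGo]
    have hmn' : (if 0 < i - 1 then min mn (nums.getD 0 0) else mn) = mnSeg nums i 0 := by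
      by_cases hc : 0 + 1 < i
      · rw [if_pos (by omega : 0 < i - 1), hmn, if_pos hc, mnSeg_cons nums i 0 hc, min_comm]
      · rw [if_neg (by omega : ¬ 0 < i - 1), hmn, if_neg hc, mnSeg_last nums i 0 hc]
    have hmx' : (if 0 < i - 1 then max mx (nums.getD 0 0) else mx) = mxSeg nums i 0 := by
      by_cases hc : 0 + 1 < i
      · rw [if_pos (by omega : 0 < i - 1), hmx, if_pos hc, mxSeg_cons nums i 0 hc, max_comm]
      · rw [if_neg (by omega : ¬ 0 < i - 1), hmx, if_neg hc, mxSeg_last nums i 0 hc]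
    simp only [hmn', hmx']
    by_cases hv : validB nums k i 0 = true
    · have hsp : ¬ mxSeg nums i 0 - mnSeg nums i 0 > k := by
        simp only [validB, decide_eq_true_eq] at hv; omega
      rw [if_neg hsp, if_pos hv]
      have hlo : loIdx nums k i = 0 :=
        Nat.le_zero.mp ((valid_iff_loIdx_le nums k i hj).mp hv)
      rw [hlo, Finset.sum_Ico_succ_top (le_refl 0), Finset.Ico_self,
          Finset.sum_empty, zero_add, hdp 0 hj]
    · have hsp : mxSeg nums i 0 - mnSeg nums i 0 > k := by
        simp only [validB, decide_eq_true_eq] at hv; omega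
      rw [if_pos hsp, if_neg hv]
  | succ j' ih =>
    intro hj mn mx hmn hmx acc
    rw [aGo]
    have hmn' : (if j' + 1 < i - 1 then min mn (nums.getD (j' + 1) 0) else mn)
        = mnSeg nums i (j' + 1) := by
      by_cases hc : j' + 1 + 1 < i
      · rw [if_pos (by omega : j' + 1 < i - 1), hmn, if_pos hc,
            mnSeg_cons nums i (j' + 1) hc, min_comm]
      · rw [if_neg (by omega : ¬ j' + 1 < i - 1), hmn, if_neg hc,
            mnSeg_last nums i (j' + 1) hc]
    have hmx' : (if j' + 1 < i - 1 then max mx (nums.getD (j' + 1) 0) else mx)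
        = mxSeg nums i (j' + 1) := by
      by_cases hc : j' + 1 + 1 < i
      · rw [if_pos (by omega : j' + 1 < i - 1), hmx, if_pos hc,
            mxSeg_cons nums i (j' + 1) hc, max_comm]
      · rw [if_neg (by omega : ¬ j' + 1 < i - 1), hmx, if_neg hc,
            mxSeg_last nums i (j' + 1) hc]
    simp only [hmn', hmx']
    by_cases hv : validB nums k i (j' + 1) = true
    · have hsp : ¬ mxSeg nums i (j' + 1) - mnSeg nums i (j' + 1) > k := by
        simp only [validB, decide_eq_true_eq] at hv; omega
      rw [if_neg hsp, if_pos hv]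
      rw [ih (by omega) (mnSeg nums i (j' + 1)) (mxSeg nums i (j' + 1))
          (if_pos hj).symm (if_pos hj).symm ((acc + dp.getD (j' + 1) 0) % 1000000007)]
      have hloJ : loIdx nums k i ≤ j' + 1 := (valid_iff_loIdx_le nums k i hj).mp hv
      by_cases hv' : validB nums k i j' = true
      · rw [if_pos hv']
        have hlo' : loIdx nums k i ≤ j' := (valid_iff_loIdx_le nums k i (by omega)).mp hv'
        rw [hdp (j' + 1) hj,
            Finset.sum_Ico_succ_top (by omega : loIdx nums k i ≤ j' + 1),
            emod_add_left]
        congr 1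
        ring
      · rw [if_neg hv']
        have hlo' : ¬ loIdx nums k i ≤ j' := fun hle =>
          hv' ((valid_iff_loIdx_le nums k i (by omega)).mpr hle)
        have hloE : loIdx nums k i = j' + 1 := by omega
        rw [hloE, Finset.sum_Ico_succ_top (le_refl (j' + 1)), Finset.Ico_self,
            Finset.sum_empty, zero_add, hdp (j' + 1) hj]
    · have hsp : mxSeg nums i (j' + 1) - mnSeg nums i (j' + 1) > k := by
        simp only [validB, decide_eq_true_eq] at hv; omega
      rw [if_pos hsp, if_neg hv]

-- A's dp value at i (1 ≤ i ≤ n) equals dpS i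
theorem aGo_dpS (nums : List Int) (k : Int) (dp : List Int) (i : Nat) (hi : 1 ≤ i)
    (_hin : i ≤ nums.length) (hdp : ∀ t, t < i → dp.getD t 0 = dpS nums k t) :
    aGo nums k dp i (i - 1) (nums.getD (i - 1) 0) (nums.getD (i - 1) 0) 0 = dpS nums k i := by
  have hij : i - 1 < i := by omega
  rw [aGo_spec nums k dp i hdp (i - 1) hij (nums.getD (i - 1) 0) (nums.getD (i - 1) 0)
      (if_neg (by omega : ¬ i - 1 + 1 < i)).symm (if_neg (by omega : ¬ i - 1 + 1 < i)).symm 0]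
  have e : i - 1 + 1 = i := by omega
  rw [e]
  have hsucc : dpS nums k i
      = (∑ t ∈ Finset.Ico (loIdx nums k i) i, dpS nums k t) % 1000000007 := by
    have e2 : i = (i - 1) + 1 := by omega
    rw [e2, dpS_succ, ← e2]
  by_cases hv : validB nums k i (i - 1) = true
  · rw [if_pos hv, hsucc, zero_add]
  · rw [if_neg hv, hsucc]
    have hlo : ¬ loIdx nums k i ≤ i - 1 := fun hle =>
      hv ((valid_iff_loIdx_le nums k i hij).mpr hle)
    have hloi : loIdx nums k i ≤ i := loIdx_le nums k i
    have hloE : loIdx nums k i = i := by omega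
    rw [hloE, Finset.Ico_self, Finset.sum_empty]
    decide

-- A's outer fold invariant
theorem aFold_spec (nums : List Int) (k : Int) :
    ∀ m, m ≤ nums.length →
      (((List.range' 1 m).foldl
        (fun dp i =>
          dp.set i (aGo nums k dp i (i - 1) (nums.getD (i - 1) 0) (nums.getD (i - 1) 0) 0))
        ((List.replicate (nums.length + 1) (0 : Int)).set 0 1)).length = nums.length + 1) ∧
      (∀ t, t ≤ m →
        ((List.range' 1 m).foldl
        (fun dp i =>
          dp.set i (aGo nums k dp i (i - 1) (nums.getD (i - 1) 0) (nums.getD (i - 1) 0) 0))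
        ((List.replicate (nums.length + 1) (0 : Int)).set 0 1)).getD t 0 = dpS nums k t) := by
  intro m
  induction m with
  | zero =>
    intro _
    constructor
    · simp
    · intro t ht
      interval_cases t
      simp only [show List.range' 1 0 = [] from rfl, List.foldl_nil]
      rw [List.getD_eq_getElem?_getD, List.getElem?_set_self (by simp)]
      rfl
  | succ m ih =>
    intro hm
    obtain ⟨ihl, ihv⟩ := ih (by omega)
    rw [List.range'_concat, List.foldl_append]
    simp only [List.foldl_cons, List.foldl_nil]
    have e : 1 + 1 * m = m + 1 := by omega
    rw [e]
    constructor
    · rw [List.length_set]; exact ihl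
    · intro t ht
      by_cases htm : t = m + 1
      · subst htm
        rw [List.getD_eq_getElem?_getD, List.getElem?_set_self (by rw [ihl]; omega)]
        simp only [Option.getD_some]
        exact aGo_dpS nums k _ (m + 1) (by omega) (by omega)
          (fun t' ht' => ihv t' (by omega))
      · rw [List.getD_eq_getElem?_getD, List.getElem?_set_ne (by omega : m + 1 ≠ t),
            ← List.getD_eq_getElem?_getD]
        exact ihv t (by omega)

-- B's fold invariant
theorem bFold_spec (nums : List Int) (k : Int) :
    ∀ m, m ≤ nums.length →
      (List.range' 1 m).foldl (bStep nums k) ([0, 1], 0) =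
        ((List.range (m + 2)).map (PS nums k), loIdx nums k m) := by
  intro m
  induction m with
  | zero =>
    intro _
    have hlo : loIdx nums k 0 = 0 := by
      unfold loIdx
      rw [dif_neg]
      rintro ⟨j, hj, _⟩
      omega
    simp only [List.range', List.foldl_nil]
    rw [hlo]
    have h0 : PS nums k 0 = 0 := by simp [PS]
    have h1 : PS nums k 1 = 1 := by
      rw [PS, Finset.sum_range_one, dpS_zero]
      decide
    have hr : (List.range 2).map (PS nums k) = [PS nums k 0, PS nums k 1] := rfl
    rw [hr, h0, h1]
  | succ m ih =>
    intro hm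
    rw [List.range'_concat, List.foldl_append, ih (by omega)]
    simp only [List.foldl_cons, List.foldl_nil]
    have e : 1 + 1 * m = m + 1 := by omega
    rw [e]
    unfold bStep
    have hadv : bAdvance nums k (m + 1) (loIdx nums k m) = loIdx nums k (m + 1) :=
      bAdvance_eq nums k (m + 1) (by omega) (m + 1) (loIdx nums k m) (by omega)
        (loIdx_mono nums k m)
    have hlo2 : loIdx nums k (m + 1) ≤ m + 1 := loIdx_le nums k (m + 1)
    have hgi : ((List.range (m + 2)).map (PS nums k)).getD (m + 1) 0 = PS nums k (m + 1) :=
      PySem.List.getD_map_range _ _ _ _ (by omega)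
    have hgl : ((List.range (m + 2)).map (PS nums k)).getD (loIdx nums k (m + 1)) 0
        = PS nums k (loIdx nums k (m + 1)) :=
      PySem.List.getD_map_range _ _ _ _ (by omega)
    simp only [hadv, hgi, hgl]
    have hdpi : (PS nums k (m + 1) - PS nums k (loIdx nums k (m + 1))) % 1000000007
        = dpS nums k (m + 1) := by
      rw [PS, PS, emod_sub_both, ← Finset.sum_Ico_eq_sub _ hlo2, ← dpS_succ]
    rw [hdpi]
    have happ : (PS nums k (m + 1) + dpS nums k (m + 1)) % 1000000007 = PS nums k (m + 2) := by
      rw [PS, emod_add_left, ← Finset.sum_range_succ]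
      rfl
    rw [happ]
    have hr : (List.range (m + 3)).map (PS nums k)
        = (List.range (m + 2)).map (PS nums k) ++ [PS nums k (m + 2)] := by
      rw [show m + 3 = (m + 2) + 1 from rfl, List.range_succ, List.map_append]
      rfl
    rw [hr]

-- ===== VERDICT (by name: the statement is the Claim_ definition above) =====
theorem countPartitions_spec : Claim_equal_countPartitions := by
  intro nums k _
  unfold Spec_countPartitions countPartitions countPartitions_alt
  obtain ⟨hAl, hAv⟩ := aFold_spec nums k nums.length (le_refl _)
  have hB := bFold_spec nums k nums.length (le_refl _)
  rw [hB]
  simp only []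
  have hlen : ((List.range (nums.length + 2)).map (PS nums k)).length = nums.length + 2 := by
    simp
  rw [hlen]
  have e1 : nums.length + 2 - 1 = nums.length + 1 := by omega
  have e2 : nums.length + 2 - 2 = nums.length := by omega
  rw [e1, e2]
  rw [PySem.List.getD_map_range _ _ _ _ (by omega : nums.length + 1 < nums.length + 2)]
  rw [PySem.List.getD_map_range _ _ _ _ (by omega : nums.length < nums.length + 2)]
  rw [hAv nums.length (le_refl _)]
  congr 1
  rw [PS, PS, emod_sub_both, Finset.sum_range_succ, add_sub_cancel_left, dpS_emod]
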